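-- pv_equiv track=rewrite | github.com/aquanautpp/Maestro | algorithm/src/milestones/conversation_indicators.py | _compute_longest_exchange
-- ===== SOURCE A (Python) =====
-- from typing import Dict, List, Optional, Any
--
-- def _compute_longest_exchange(events: List[Dict]) -> int:
--     """Compute longest back-and-forth exchange from events."""
--     longest = 0
--     current = 0
--     last_speaker = None
--
--     for event in events:
--         event_type = event.get("type")
--         if event_type in ["child", "adult"]:
--             if last_speaker is None or event_type != last_speaker:
--                 current += 1
--                 longest = max(longest, current)
--             else:
--                 current = 1
--             last_speaker = event_type
--
--     return longest
-- ===== SOURCE B (Python) =====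
-- def _compute_longest_exchange(events):
--     """Compute longest back-and-forth exchange from events."""
--     speakers = [e.get("type") for e in events if e.get("type") in ("child", "adult")]
--     n = len(speakers)
--     if n == 0:
--         return 0
--     # positions where the streak breaks (same speaker twice in a row)
--     breaks = [i for i, (a, b) in enumerate(zip(speakers, speakers[1:]), 1) if a == b]
--     cuts = [0] + breaks + [n]
--     return max(b - a for a, b in zip(cuts, cuts[1:]))
-- ===== Notes on version B (the rewrite author's own statement) =====
-- stated objective: alternative
-- what changed: B replaces A's running last_speaker/current/longest state machine by a break-position formulation: it lists the indices where the same speaker talks twice in a row and returns the maximum gap between consecutive cut positions [0]+breaks+[n].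
import Mathlib
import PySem

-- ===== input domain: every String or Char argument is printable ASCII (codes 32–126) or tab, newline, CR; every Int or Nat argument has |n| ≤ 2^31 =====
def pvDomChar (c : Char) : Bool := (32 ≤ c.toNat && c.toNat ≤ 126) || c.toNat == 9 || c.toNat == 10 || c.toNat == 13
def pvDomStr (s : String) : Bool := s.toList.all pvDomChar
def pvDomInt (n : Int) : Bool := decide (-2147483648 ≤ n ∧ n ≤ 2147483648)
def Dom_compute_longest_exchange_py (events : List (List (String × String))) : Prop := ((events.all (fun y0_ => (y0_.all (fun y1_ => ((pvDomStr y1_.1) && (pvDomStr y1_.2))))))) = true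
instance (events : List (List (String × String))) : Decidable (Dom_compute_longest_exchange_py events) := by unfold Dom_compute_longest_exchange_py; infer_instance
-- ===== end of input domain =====

-- B computes the answer as the maximum gap between consecutive break positions ([0]+breaks+[n]) instead of A's last_speaker/current running state machine (alternative algorithm, same cost).


-- ===== PORT A =====
-- loop body of A's for-loop (event.get("type") = dict lookup)
def pvStepA (s : Int × Int × Option String) (event : List (String × String)) : Int × Int × Option String :=
  let event_type := (PySem.Dict.ofList event).get? "type"
  if event_type = some "child" ∨ event_type = some "adult" then
    if s.2.2 = none ∨ event_type ≠ s.2.2 then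
      (max s.1 (s.2.1 + 1), s.2.1 + 1, event_type)
    else
      (s.1, 1, event_type)
  else s

def compute_longest_exchange_py (events : List (List (String × String))) : Int :=
  (events.foldl pvStepA (0, 0, none)).1

-- ===== PORT B =====
-- the comprehension: [e.get("type") for e in events if e.get("type") in ("child", "adult")]
def pvKeep (e : List (String × String)) : Option String :=
  match (PySem.Dict.ofList e).get? "type" with
  | some t => if t = "child" ∨ t = "adult" then some t else none
  | none => none

def pvSpeakers (events : List (List (String × String))) : List String :=
  events.filterMap pvKeep

-- breaks = [i for i, (a, b) in enumerate(zip(speakers, speakers[1:]), 1) if a == b]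
def pvBreaksOf (speakers : List String) : List Int :=
  (PySem.List.enumerate (speakers.zip speakers.tail) 1).filterMap
    (fun p => if p.2.1 = p.2.2 then some p.1 else none)

def compute_longest_exchange_py_alt (events : List (List (String × String))) : Int :=
  let speakers := pvSpeakers events
  if speakers.length = 0 then 0 else
  -- cuts = [0] + breaks + [n]
  let cuts : List Int := 0 :: (pvBreaksOf speakers ++ [(speakers.length : Int)])
  -- max(b - a for a, b in zip(cuts, cuts[1:]))  (cuts always has ≥ 2 elements, so the [] arm is unreachable)
  let diffs := (cuts.zip cuts.tail).map (fun p => p.2 - p.1)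
  match diffs with
  | [] => 0
  | d :: ds => ds.foldl max d

-- ===== PRECONDITION & SPEC =====
def Spec_compute_longest_exchange_py (events : List (List (String × String))) (out : Int) : Prop := out = compute_longest_exchange_py_alt events
instance (events : List (List (String × String))) (out : Int) : Decidable (Spec_compute_longest_exchange_py events out) := by unfold Spec_compute_longest_exchange_py; infer_instance

-- ===== CLAIM (what is proved, stated in full; the proofs are below) =====
def Claim_equal_compute_longest_exchange_py : Prop := ∀ (events : List (List (String × String))), Dom_compute_longest_exchange_py events → Spec_compute_longest_exchange_py events (compute_longest_exchange_py events)

-- ===== LEMMAS AND PROOFS =====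

-- A's loop restricted to the valid speakers
def pvStepT (s : Int × Int × Option String) (t : String) : Int × Int × Option String :=
  if s.2.2 = none ∨ some t ≠ s.2.2 then
    (max s.1 (s.2.1 + 1), s.2.1 + 1, some t)
  else
    (s.1, 1, some t)

theorem pvStepA_keep_none (s : Int × Int × Option String) (e : List (String × String))
    (h : pvKeep e = none) : pvStepA s e = s := by
  unfold pvKeep at h
  cases hg : (PySem.Dict.ofList e).get? "type" with
  | none => simp [pvStepA, hg]
  | some t =>
    rw [hg] at h
    simp only [] at h
    have ht : ¬(t = "child" ∨ t = "adult") := by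
      intro hc; simp [hc] at h
    simp [pvStepA, hg, ht]

theorem pvStepA_keep_some (s : Int × Int × Option String) (e : List (String × String))
    (t : String) (h : pvKeep e = some t) : pvStepA s e = pvStepT s t := by
  unfold pvKeep at h
  cases hg : (PySem.Dict.ofList e).get? "type" with
  | none => rw [hg] at h; simp at h
  | some u =>
    rw [hg] at h
    by_cases hu : u = "child" ∨ u = "adult"
    · simp only [hu, if_pos, Option.some.injEq] at h
      subst h
      simp only [pvStepA, pvStepT, hg]
      rw [if_pos (by rcases hu with h1 | h1 <;> simp [h1])]
    · simp [hu] at h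

theorem pvFoldA_speakers (events : List (List (String × String))) (s : Int × Int × Option String) :
    events.foldl pvStepA s = (pvSpeakers events).foldl pvStepT s := by
  induction events generalizing s with
  | nil => rfl
  | cons e rest ih =>
    simp only [List.foldl_cons, pvSpeakers, List.filterMap_cons]
    cases h : pvKeep e with
    | none => rw [pvStepA_keep_none s e h]; exact ih s
    | some t =>
      rw [pvStepA_keep_some s e t h]
      simp only [List.foldl_cons]
      exact ih (pvStepT s t)

-- adjacent pairs of a list (structural form of zip xs xs.tail)
def pvPairs {α : Type} : List α → List (α × α)
  | a :: b :: r => (a, b) :: pvPairs (b :: r)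
  | _ => []

theorem pvPairs_eq_zip_tail {α : Type} (s : List α) : pvPairs s = s.zip s.tail := by
  induction s with
  | nil => rfl
  | cons a r ih =>
    cases r with
    | nil => rfl
    | cons b r' => simp [pvPairs, ih]

theorem pvPairs_cons_snoc {α : Type} (a : α) (r : List α) (t : α) :
    pvPairs (a :: r ++ [t]) = pvPairs (a :: r) ++ [((a :: r).getLast (by simp), t)] := by
  induction r generalizing a with
  | nil => rfl
  | cons b r' ih =>
    show pvPairs (a :: b :: (r' ++ [t])) = _
    rw [show pvPairs (a :: b :: (r' ++ [t])) = (a, b) :: pvPairs (b :: r' ++ [t]) from rfl, ih b]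
    simp [pvPairs]

theorem pvPairs_snoc {α : Type} (r : List α) (hr : r ≠ []) (t : α) :
    pvPairs (r ++ [t]) = pvPairs r ++ [(r.getLast hr, t)] := by
  match r with
  | a :: r' => exact pvPairs_cons_snoc a r' t

theorem pvEnum_append {α : Type} (l1 l2 : List α) (s : Int) :
    PySem.List.enumerate (l1 ++ l2) s
      = PySem.List.enumerate l1 s ++ PySem.List.enumerate l2 (s + l1.length) := by
  induction l1 generalizing s with
  | nil => simp [PySem.List.enumerate_nil]
  | cons a r ih =>
    simp only [List.cons_append, PySem.List.enumerate_cons, ih (s + 1), List.length_cons]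
    push_cast
    ring_nf

-- break positions of a speaker list (1-based index i with s[i] = s[i-1])
def pvBreaks (s : List String) : List Int :=
  (PySem.List.enumerate (pvPairs s) 1).filterMap
    (fun p => if p.2.1 = p.2.2 then some p.1 else none)

theorem pvLen_pvPairs {α : Type} (a : α) (r : List α) :
    (pvPairs (a :: r)).length = r.length := by
  induction r generalizing a with
  | nil => rfl
  | cons b r' ih => simp [pvPairs, ih b]

theorem pvBreaks_snoc (r : List String) (hr : r ≠ []) (t : String) :
    pvBreaks (r ++ [t])
      = pvBreaks r ++ (if t = r.getLast hr then [(r.length : Int)] else []) := by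
  unfold pvBreaks
  rw [pvPairs_snoc r hr, pvEnum_append, List.filterMap_append]
  congr 1
  match r, hr with
  | a :: r', _ =>
    rw [pvLen_pvPairs]
    simp only [PySem.List.enumerate_cons, PySem.List.enumerate_nil, List.filterMap_cons,
      List.filterMap_nil]
    by_cases h : (a :: r').getLast (by simp) = t
    · simp [h, List.length_cons]
      omega
    · simp [h, Ne.symm h]

-- gaps between consecutive cut positions, starting from prev
def pvGaps (prev : Int) : List Int → List Int
  | [] => []
  | c :: cs => (c - prev) :: pvGaps c cs

theorem pvGaps_eq_map_pairs (p : Int) (l : List Int) :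
    (pvPairs (p :: l)).map (fun q => q.2 - q.1) = pvGaps p l := by
  induction l generalizing p with
  | nil => rfl
  | cons c cs ih => simp [pvPairs, pvGaps, ih c]

theorem pvGaps_snoc (p : Int) (l : List Int) (c : Int) :
    pvGaps p (l ++ [c]) = pvGaps p l ++ [c - l.getLastD p] := by
  induction l generalizing p with
  | nil => rfl
  | cons d ds ih => simp only [List.cons_append, pvGaps, ih d, List.getLastD_cons]

-- max of a nonempty list, as B's fold computes it
def pvMaxNE (d : Int) (ds : List Int) : Int := ds.foldl max d

theorem pvGaps_ne_nil (p : Int) (l : List Int) (h : l ≠ []) : pvGaps p l ≠ [] := by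
  cases l with
  | nil => exact absurd rfl h
  | cons c cs => simp [pvGaps]

theorem pvMaxNE_snoc (d : Int) (ds : List Int) (a : Int) :
    pvMaxNE d (ds ++ [a]) = max (pvMaxNE d ds) a := by
  simp [pvMaxNE, List.foldl_append]

-- B's value for a nonempty list of cut gaps
def pvMaxGaps (l : List Int) (n : Int) : Int :=
  match pvGaps 0 (l ++ [n]) with
  | [] => 0
  | d :: ds => pvMaxNE d ds

theorem pvMaxGaps_nil (n : Int) : pvMaxGaps [] n = n := by
  simp [pvMaxGaps, pvGaps, pvMaxNE]

theorem pvMaxGaps_last (l : List Int) (n m : Int) (h : n ≤ m) :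
    max (pvMaxGaps l n) (m - l.getLastD 0) = pvMaxGaps l m := by
  unfold pvMaxGaps
  rw [pvGaps_snoc, pvGaps_snoc]
  cases hg : pvGaps 0 l with
  | nil =>
    cases l with
    | nil =>
      simp [pvMaxNE]
      omega
    | cons c cs => simp [pvGaps] at hg
  | cons d ds =>
    simp only [List.cons_append, pvMaxNE_snoc]
    omega

theorem pvMaxGaps_break (l : List Int) (m : Int) :
    pvMaxGaps (l ++ [m]) (m + 1) = max (pvMaxGaps l m) 1 := by
  unfold pvMaxGaps
  rw [pvGaps_snoc 0 (l ++ [m]) (m + 1), List.getLastD_concat, pvGaps_snoc 0 l m]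
  cases hg : pvGaps 0 l with
  | nil =>
    cases l with
    | nil => simp [pvMaxNE]
    | cons c cs => simp [pvGaps] at hg
  | cons d ds =>
    simp only [List.cons_append, pvMaxNE_snoc]
    omega

-- the master invariant: A's state machine on a nonempty speaker list equals its break-gap data
theorem pvInvariant (s : List String) (hs : s ≠ []) :
    s.foldl pvStepT (0, 0, none)
        = (pvMaxGaps (pvBreaks s) (s.length : Int),
           (s.length : Int) - (pvBreaks s).getLastD 0,
           some (s.getLast hs))
      ∧ (pvBreaks s).getLastD 0 < (s.length : Int)
      ∧ 0 ≤ (pvBreaks s).getLastD 0 := by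
  induction s using List.reverseRecOn with
  | nil => exact absurd rfl hs
  | append_singleton r t ih =>
    rcases eq_or_ne r [] with hr | hr
    · subst hr
      refine ⟨?_, ?_, ?_⟩ <;>
        simp [pvStepT, pvBreaks, pvPairs, pvMaxGaps_nil, PySem.List.enumerate_nil]
    · obtain ⟨ih1, ih2, ih3⟩ := ih hr
      rw [List.foldl_append, ih1, pvBreaks_snoc r hr t]
      have hlast : (r ++ [t]).getLast (by simp) = t := List.getLast_concat
      have hlen : ((r ++ [t]).length : Int) = (r.length : Int) + 1 := by
        simp [List.length_append]
      set G := pvMaxGaps (pvBreaks r) (r.length : Int) with hG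
      set D := (pvBreaks r).getLastD 0 with hD
      have hG1 : 1 ≤ G := by
        have := pvMaxGaps_last (pvBreaks r) (r.length : Int) (r.length : Int) (le_refl _)
        rw [← hG, ← hD] at this
        omega
      by_cases ht : t = r.getLast hr
      · -- same speaker twice: a new break at position r.length
        rw [if_pos ht]
        have hstep : pvStepT (G, (r.length : Int) - D, some (r.getLast hr)) t
            = (G, 1, some t) := by
          simp [pvStepT, ht]
        rw [List.foldl_cons, List.foldl_nil, hstep]
        refine ⟨?_, ?_, ?_⟩
        · rw [hlast, hlen, List.getLastD_concat,
            pvMaxGaps_break (pvBreaks r) (r.length : Int), ← hG]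
          rw [show max G 1 = G by omega,
            show (r.length : Int) + 1 - (r.length : Int) = 1 by ring]
        · rw [hlen, List.getLastD_concat]; omega
        · rw [List.getLastD_concat]; positivity
      · -- speaker alternates: no new break, the run extends
        rw [if_neg ht, List.append_nil]
        have hne : (some t : Option String) ≠ some (r.getLast hr) := by simp [ht]
        have hstep : pvStepT (G, (r.length : Int) - D, some (r.getLast hr)) t
            = (max G ((r.length : Int) - D + 1), (r.length : Int) - D + 1, some t) := by
          simp [pvStepT, hne]
        rw [List.foldl_cons, List.foldl_nil, hstep]
        have hmg : max G ((r.length : Int) + 1 - D)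
            = pvMaxGaps (pvBreaks r) ((r.length : Int) + 1) := by
          rw [hG, hD]
          exact pvMaxGaps_last (pvBreaks r) (r.length : Int) ((r.length : Int) + 1) (by omega)
        refine ⟨?_, ?_, ?_⟩
        · rw [hlast, hlen, show (r.length : Int) - D + 1 = (r.length : Int) + 1 - D by ring,
            hmg]
        · rw [hlen]; omega
        · exact ih3

-- ===== VERDICT (by name: the statement is the Claim_ definition above) =====
theorem compute_longest_exchange_py_spec : Claim_equal_compute_longest_exchange_py := by
  intro events _
  unfold Spec_compute_longest_exchange_py compute_longest_exchange_py compute_longest_exchange_py_alt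
  rw [pvFoldA_speakers]
  cases hs : pvSpeakers events with
  | nil => simp
  | cons x rest =>
    rw [if_neg (by simp)]
    obtain ⟨h1, _, _⟩ := pvInvariant (x :: rest) (by simp)
    rw [h1]
    simp only []
    have hbr : pvBreaksOf (x :: rest) = pvBreaks (x :: rest) := by
      unfold pvBreaksOf pvBreaks
      rw [pvPairs_eq_zip_tail]
    rw [hbr]
    set breaks := pvBreaks (x :: rest) with hb
    set n : Int := ((x :: rest).length : Int) with hn
    have hd : ((0 :: (breaks ++ [n])).zip (0 :: (breaks ++ [n])).tail).map
        (fun p => p.2 - p.1) = pvGaps 0 (breaks ++ [n]) := by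
      rw [← pvPairs_eq_zip_tail]
      exact pvGaps_eq_map_pairs 0 (breaks ++ [n])
    rw [hd]
    unfold pvMaxGaps
    cases hg : pvGaps 0 (breaks ++ [n]) with
    | nil => exact absurd hg (pvGaps_ne_nil 0 _ (by simp))
    | cons d ds => rfl
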